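-- pv_equiv track=rewrite | github.com/Krishna9588/store_files | prime_extract_02.py | get_summary_category
-- ===== SOURCE A (Python) =====
-- def get_summary_category(granular_category):
--     """Maps a detailed category to a high-level summary category for easy reporting."""
--     HIERARCHICAL_MAP = {
--         "PARTNER": ["Partnership_Formal_Alliance", "Partnership_Collaborative_Project", "Commercial_Solutions_Provider",
--                     "Commercial_Sales_Channel", "Commercial_Case_Study_Proof"],
--         "USER": ["Usage_Core_Infrastructure", "Usage_Active_Deployment", "Usage_Development_Stack",
--                  "Usage_Product_Integration", "Technical_Strategic_Modernization", "Technical_DevOps_And_Automation",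
--                  "Technical_Performance_Optimization", "Technical_Ongoing_Operations"],
--         "RECRUITING": ["Hiring_Active_Recruitment", "Hiring_Skill_Requirement", "Hiring_Proficiency_And_Certification"],
--         "FINANCIAL": ["Financial_Budget_And_Investment", "Financial_Direct_Procurement",
--                       "Financial_Service_Engagement"],
--         "CONTENT": ["Content_Informational_Guide", "Content_Marketing_And_Promotion", "Content_News_And_Announcements",
--                     "Content_Comparison_Review"]
--     }
--     for summary, granular_list in HIERARCHICAL_MAP.items():
--         if granular_category in granular_list:
--             return summary
--     return "UNCATEGORIZED"
-- ===== SOURCE B (Python) =====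
-- # Flat inverted lookup table: each granular category maps directly to its summary.
-- _SUMMARY_OF = {
--     "Partnership_Formal_Alliance": "PARTNER",
--     "Partnership_Collaborative_Project": "PARTNER",
--     "Commercial_Solutions_Provider": "PARTNER",
--     "Commercial_Sales_Channel": "PARTNER",
--     "Commercial_Case_Study_Proof": "PARTNER",
--     "Usage_Core_Infrastructure": "USER",
--     "Usage_Active_Deployment": "USER",
--     "Usage_Development_Stack": "USER",
--     "Usage_Product_Integration": "USER",
--     "Technical_Strategic_Modernization": "USER",
--     "Technical_DevOps_And_Automation": "USER",
--     "Technical_Performance_Optimization": "USER",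
--     "Technical_Ongoing_Operations": "USER",
--     "Hiring_Active_Recruitment": "RECRUITING",
--     "Hiring_Skill_Requirement": "RECRUITING",
--     "Hiring_Proficiency_And_Certification": "RECRUITING",
--     "Financial_Budget_And_Investment": "FINANCIAL",
--     "Financial_Direct_Procurement": "FINANCIAL",
--     "Financial_Service_Engagement": "FINANCIAL",
--     "Content_Informational_Guide": "CONTENT",
--     "Content_Marketing_And_Promotion": "CONTENT",
--     "Content_News_And_Announcements": "CONTENT",
--     "Content_Comparison_Review": "CONTENT",
-- }
--
--
-- def get_summary_category(granular_category):
--     """Maps a detailed category to a high-level summary category for easy reporting."""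
--     return _SUMMARY_OF.get(granular_category, "UNCATEGORIZED")
-- ===== Notes on version B (the rewrite author's own statement) =====
-- stated objective: idiomatic
-- what changed: B replaces A's per-call loop over summaries with a linear membership scan of each list by a single .get with default on a flat granular->summary dictionary literal (the hierarchy inverted by hand), removing the search loops entirely.
import Mathlib
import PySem

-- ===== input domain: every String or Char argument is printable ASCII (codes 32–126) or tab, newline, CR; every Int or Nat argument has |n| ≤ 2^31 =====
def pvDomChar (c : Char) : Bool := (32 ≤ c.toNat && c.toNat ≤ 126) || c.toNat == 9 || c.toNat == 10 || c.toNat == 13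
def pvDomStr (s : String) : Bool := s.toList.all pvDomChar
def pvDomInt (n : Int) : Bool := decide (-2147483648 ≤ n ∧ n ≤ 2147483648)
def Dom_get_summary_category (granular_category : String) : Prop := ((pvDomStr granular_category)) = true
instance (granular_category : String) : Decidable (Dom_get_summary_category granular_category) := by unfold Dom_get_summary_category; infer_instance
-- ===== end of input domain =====

-- B answers via one lookup in a hand-inverted flat granular->summary table instead of A's loop scanning each summary's list (idiomatic).


-- ===== PORT A =====
-- A's HIERARCHICAL_MAP literal (dict iterated in insertion order)
def pvHMap : List (String × List String) := [
  ("PARTNER", ["Partnership_Formal_Alliance", "Partnership_Collaborative_Project", "Commercial_Solutions_Provider", "Commercial_Sales_Channel", "Commercial_Case_Study_Proof"]),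
  ("USER", ["Usage_Core_Infrastructure", "Usage_Active_Deployment", "Usage_Development_Stack", "Usage_Product_Integration", "Technical_Strategic_Modernization", "Technical_DevOps_And_Automation", "Technical_Performance_Optimization", "Technical_Ongoing_Operations"]),
  ("RECRUITING", ["Hiring_Active_Recruitment", "Hiring_Skill_Requirement", "Hiring_Proficiency_And_Certification"]),
  ("FINANCIAL", ["Financial_Budget_And_Investment", "Financial_Direct_Procurement", "Financial_Service_Engagement"]),
  ("CONTENT", ["Content_Informational_Guide", "Content_Marketing_And_Promotion", "Content_News_And_Announcements", "Content_Comparison_Review"])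
]

-- for summary, granular_list in HIERARCHICAL_MAP.items(): if granular_category in granular_list: return summary
def pvLoopA : List (String × List String) → String → String
  | [], _ => "UNCATEGORIZED"
  | (summary, lst) :: rest, g => if g ∈ lst then summary else pvLoopA rest g

def get_summary_category (granular_category : String) : String :=
  pvLoopA pvHMap granular_category

-- ===== PORT B =====
-- Source B's flat dict literal _SUMMARY_OF (hand-inverted hierarchy)
def pvSummaryOf : PySem.Dict String String := PySem.Dict.mk [
  ("Partnership_Formal_Alliance", "PARTNER"),
  ("Partnership_Collaborative_Project", "PARTNER"),
  ("Commercial_Solutions_Provider", "PARTNER"),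
  ("Commercial_Sales_Channel", "PARTNER"),
  ("Commercial_Case_Study_Proof", "PARTNER"),
  ("Usage_Core_Infrastructure", "USER"),
  ("Usage_Active_Deployment", "USER"),
  ("Usage_Development_Stack", "USER"),
  ("Usage_Product_Integration", "USER"),
  ("Technical_Strategic_Modernization", "USER"),
  ("Technical_DevOps_And_Automation", "USER"),
  ("Technical_Performance_Optimization", "USER"),
  ("Technical_Ongoing_Operations", "USER"),
  ("Hiring_Active_Recruitment", "RECRUITING"),
  ("Hiring_Skill_Requirement", "RECRUITING"),
  ("Hiring_Proficiency_And_Certification", "RECRUITING"),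
  ("Financial_Budget_And_Investment", "FINANCIAL"),
  ("Financial_Direct_Procurement", "FINANCIAL"),
  ("Financial_Service_Engagement", "FINANCIAL"),
  ("Content_Informational_Guide", "CONTENT"),
  ("Content_Marketing_And_Promotion", "CONTENT"),
  ("Content_News_And_Announcements", "CONTENT"),
  ("Content_Comparison_Review", "CONTENT")
]

-- return _SUMMARY_OF.get(granular_category, "UNCATEGORIZED")
def get_summary_category_alt (granular_category : String) : String :=
  PySem.Dict.getD pvSummaryOf granular_category "UNCATEGORIZED"

-- ===== PRECONDITION & SPEC =====
def Spec_get_summary_category (granular_category : String) (out : String) : Prop := out = get_summary_category_alt granular_category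
instance (granular_category : String) (out : String) : Decidable (Spec_get_summary_category granular_category out) := by unfold Spec_get_summary_category; infer_instance

-- ===== CLAIM (what is proved, stated in full; the proofs are below) =====
def Claim_equal_get_summary_category : Prop := ∀ (granular_category : String), Dom_get_summary_category granular_category → Spec_get_summary_category granular_category (get_summary_category granular_category)

-- ===== LEMMAS AND PROOFS =====
theorem pv_agree (g : String) : get_summary_category g = get_summary_category_alt g := by
  unfold get_summary_category get_summary_category_alt pvHMap pvLoopA pvSummaryOf
  simp only [PySem.Dict.getD, PySem.Dict.get?_mk_cons, List.mem_cons, List.not_mem_nil]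
  by_cases h1 : g = "Partnership_Formal_Alliance"
  · simp [h1]
  by_cases h2 : g = "Partnership_Collaborative_Project"
  · simp [h2]
  by_cases h3 : g = "Commercial_Solutions_Provider"
  · simp [h3]
  by_cases h4 : g = "Commercial_Sales_Channel"
  · simp [h4]
  by_cases h5 : g = "Commercial_Case_Study_Proof"
  · simp [h5]
  by_cases h6 : g = "Usage_Core_Infrastructure"
  · simp [h6, pvLoopA]
  by_cases h7 : g = "Usage_Active_Deployment"
  · simp [h7, pvLoopA]
  by_cases h8 : g = "Usage_Development_Stack"
  · simp [h8, pvLoopA]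
  by_cases h9 : g = "Usage_Product_Integration"
  · simp [h9, pvLoopA]
  by_cases h10 : g = "Technical_Strategic_Modernization"
  · simp [h10, pvLoopA]
  by_cases h11 : g = "Technical_DevOps_And_Automation"
  · simp [h11, pvLoopA]
  by_cases h12 : g = "Technical_Performance_Optimization"
  · simp [h12, pvLoopA]
  by_cases h13 : g = "Technical_Ongoing_Operations"
  · simp [h13, pvLoopA]
  by_cases h14 : g = "Hiring_Active_Recruitment"
  · simp [h14, pvLoopA]
  by_cases h15 : g = "Hiring_Skill_Requirement"
  · simp [h15, pvLoopA]
  by_cases h16 : g = "Hiring_Proficiency_And_Certification"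
  · simp [h16, pvLoopA]
  by_cases h17 : g = "Financial_Budget_And_Investment"
  · simp [h17, pvLoopA]
  by_cases h18 : g = "Financial_Direct_Procurement"
  · simp [h18, pvLoopA]
  by_cases h19 : g = "Financial_Service_Engagement"
  · simp [h19, pvLoopA]
  by_cases h20 : g = "Content_Informational_Guide"
  · simp [h20, pvLoopA]
  by_cases h21 : g = "Content_Marketing_And_Promotion"
  · simp [h21, pvLoopA]
  by_cases h22 : g = "Content_News_And_Announcements"
  · simp [h22, pvLoopA]
  by_cases h23 : g = "Content_Comparison_Review"
  · simp [h23, pvLoopA]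
  simp [pvLoopA, PySem.Dict.get?, h1, h2, h3, h4, h5, h6, h7, h8, h9, h10, h11, h12, h13, h14, h15, h16, h17, h18, h19, h20, h21, h22, h23, (Ne.symm h1), (Ne.symm h2), (Ne.symm h3), (Ne.symm h4), (Ne.symm h5), (Ne.symm h6), (Ne.symm h7), (Ne.symm h8), (Ne.symm h9), (Ne.symm h10), (Ne.symm h11), (Ne.symm h12), (Ne.symm h13), (Ne.symm h14), (Ne.symm h15), (Ne.symm h16), (Ne.symm h17), (Ne.symm h18), (Ne.symm h19), (Ne.symm h20), (Ne.symm h21), (Ne.symm h22), (Ne.symm h23)]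

-- ===== VERDICT (by name: the statement is the Claim_ definition above) =====
theorem get_summary_category_spec : Claim_equal_get_summary_category := by
  intro g _
  exact pv_agree g
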